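/- GENERATED by farm/mkstatement.py from design/units.tsv (unit `inverse_mdct.COMPOSITION`) and the Specs of Vorbis/Spec/*.lean — do not edit.
   THE STATEMENT of the proof unit `inverse_mdct.COMPOSITION`: the function `inverse_mdct` (898 instructions) satisfies its contract,
   GIVEN THE STATEMENTS OF ITS 12 SEGMENTS (`Vorbis.Spec.inverse_mdct.Seg<k> Lay μ u₀`: what the unit `inverse_mdct.<k>` proves).
   No machine code is walked: `ReachVia.trans` along the segments (the exit assertion of a segment is the entry assertion of
   its successor), an induction on the loop measures. What the names mean: Vorbis/Spec/Basic.lean. The theorem to prove: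
   `theorem inverse_mdct_COMPOSITION_ok : Vorbis.Spec.inverse_mdct_COMPOSITION.Statement`. -/
import Vorbis.Spec.MdctTop
namespace Vorbis.Spec.inverse_mdct_COMPOSITION
open X86 X86.User Asan

/-- The statement of unit `inverse_mdct.COMPOSITION`. -/
def Statement : Prop :=
  ∀ (Lay : Layout) (_hLay : Lay.hi = 0x1000000) (μ : Microarch) (_hμ : UserX.MicroOK μ) (u₀ : State)
    (_h_inverse_mdct_1 : Vorbis.Spec.inverse_mdct.Seg1 Lay μ u₀)
    (_h_inverse_mdct_2 : Vorbis.Spec.inverse_mdct.Seg2 Lay μ u₀)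
    (_h_inverse_mdct_3 : Vorbis.Spec.inverse_mdct.Seg3 Lay μ u₀)
    (_h_inverse_mdct_4 : Vorbis.Spec.inverse_mdct.Seg4 Lay μ u₀)
    (_h_inverse_mdct_5 : Vorbis.Spec.inverse_mdct.Seg5 Lay μ u₀)
    (_h_inverse_mdct_6 : Vorbis.Spec.inverse_mdct.Seg6 Lay μ u₀)
    (_h_inverse_mdct_7 : Vorbis.Spec.inverse_mdct.Seg7 Lay μ u₀)
    (_h_inverse_mdct_8 : Vorbis.Spec.inverse_mdct.Seg8 Lay μ u₀)
    (_h_inverse_mdct_9 : Vorbis.Spec.inverse_mdct.Seg9 Lay μ u₀)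
    (_h_inverse_mdct_10 : Vorbis.Spec.inverse_mdct.Seg10 Lay μ u₀)
    (_h_inverse_mdct_11 : Vorbis.Spec.inverse_mdct.Seg11 Lay μ u₀)
    (_h_inverse_mdct_12 : Vorbis.Spec.inverse_mdct.Seg12 Lay μ u₀),
    ∀ (others : List Obj) (frames : List (Nat × FrameLayout)) (len : Nat) (A : Arena) (stored room : Int) (ysz : Nat → Nat) (k c : Nat), Calls Lay μ Vorbis.WayInv (Vorbis.conv u₀) Vorbis.L.inverse_mdct.entry (Vorbis.Spec.inverse_mdct.spec others frames len A stored room ysz k c)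

end Vorbis.Spec.inverse_mdct_COMPOSITION
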